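-- pv_equiv track=rewrite | github.com/vpakspace/universal-agent-connector | nl_resource_resolver.py | rank_tools
-- ===== SOURCE A (Python) =====
-- from typing import List, Dict, Any, Optional, Tuple
-- from collections import Counter
--
-- def rank_tools(
--     concepts: List[str],
--     available_tools: List[str],
--     concept_to_tools: Dict[str, List[str]],
--     max_tools: int = 5
-- ) -> List[str]:
--     """
--     Rank and return top most relevant tools based on matched concepts
--
--     Args:
--         concepts: List of matched concept names
--         available_tools: List of all available tools (for filtering)
--         concept_to_tools: Dictionary mapping concepts to their tools
--         max_tools: Maximum number of tools to return (default: 5)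
--
--     Returns:
--         List of ranked tool names
--     """
--     if not concepts:
--         # Return generic search tool if no concepts matched
--         generic_tools = ["search_resources", "query_data", "list_tables"]
--         return [tool for tool in generic_tools if tool in available_tools][:max_tools]
--
--     # Count tool occurrences across all matched concepts
--     tool_scores: Dict[str, int] = Counter()
--
--     for concept in concepts:
--         concept_tools = concept_to_tools.get(concept, [])
--         for tool in concept_tools:
--             if tool in available_tools:  # Only include available tools
--                 tool_scores[tool] += 1
--
--     # Sort by score (descending), then alphabetically
--     ranked_tools = sorted(
--         tool_scores.items(),
--         key=lambda x: (-x[1], x[0])  # Negative score for descending sort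
--     )
--
--     # Return top tools
--     top_tools = [tool for tool, score in ranked_tools[:max_tools]]
--
--     # If we don't have enough tools, add from concepts even if not scored
--     if len(top_tools) < max_tools:
--         all_tools = set(top_tools)
--         for concept in concepts:
--             concept_tools = concept_to_tools.get(concept, [])
--             for tool in concept_tools:
--                 if tool in available_tools and tool not in all_tools:
--                     all_tools.add(tool)
--                     top_tools.append(tool)
--                     if len(top_tools) >= max_tools:
--                         break
--             if len(top_tools) >= max_tools:
--                 break
--
--     return top_tools[:max_tools]
-- ===== SOURCE B (Python) =====
-- from collections import Counter, defaultdict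
-- from typing import List, Dict
--
-- def rank_tools(
--     concepts: List[str],
--     available_tools: List[str],
--     concept_to_tools: Dict[str, List[str]],
--     max_tools: int = 5
-- ) -> List[str]:
--     if not concepts:
--         generic_tools = ["search_resources", "query_data", "list_tables"]
--         return [tool for tool in generic_tools if tool in available_tools][:max_tools]
--     # Inverted traversal: walk the concept->tools mapping once, weighting each
--     # entry by the multiplicity of its concept among the matched concepts.
--     weight = Counter(concepts)
--     avail = set(available_tools)
--     scores = {}
--     for concept, tools in concept_to_tools.items():
--         w = weight[concept]
--         if w:
--             for tool in tools:
--                 if tool in avail: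
--                     scores[tool] = scores.get(tool, 0) + w
--     # Distribution (bucket) selection: group tools by score, emit buckets from
--     # the highest score down, names alphabetically inside a bucket.
--     buckets = defaultdict(list)
--     for tool, score in scores.items():
--         buckets[score].append(tool)
--     result = []
--     for score in sorted(buckets, reverse=True):
--         for tool in sorted(buckets[score]):
--             if len(result) >= max_tools:
--                 return result
--             result.append(tool)
--     return result
-- ===== Notes on version B (the rewrite author's own statement) =====
-- stated objective: faster
-- what changed: B inverts the traversal (one weighted pass over concept_to_tools.items() using a Counter of concepts, with a set for availability, instead of per-concept dict lookups with linear available_tools scans) and replaces the full comparison sort of (-score, name) pairs by distribution selection over score buckets emitted from highest score down with names sorted per bucket; A's provably dead fallback loop is dropped.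
-- intended difference: On negative max_tools with at least one matched concept and more than 2*|max_tools| distinct matched available tools, A returns the ranked list accidentally truncated by two negative slices (ranked[:max_tools] and then top_tools[:max_tools] again), while B returns [] (its emission loop stops before adding anything), the intended reading of a non-positive tool budget. — e.g. on rank_tools(["c"], ["a", "b", "c"], [("c", ["a", "b", "c"])], -1): A returns ["a"], B returns []
import Mathlib
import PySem

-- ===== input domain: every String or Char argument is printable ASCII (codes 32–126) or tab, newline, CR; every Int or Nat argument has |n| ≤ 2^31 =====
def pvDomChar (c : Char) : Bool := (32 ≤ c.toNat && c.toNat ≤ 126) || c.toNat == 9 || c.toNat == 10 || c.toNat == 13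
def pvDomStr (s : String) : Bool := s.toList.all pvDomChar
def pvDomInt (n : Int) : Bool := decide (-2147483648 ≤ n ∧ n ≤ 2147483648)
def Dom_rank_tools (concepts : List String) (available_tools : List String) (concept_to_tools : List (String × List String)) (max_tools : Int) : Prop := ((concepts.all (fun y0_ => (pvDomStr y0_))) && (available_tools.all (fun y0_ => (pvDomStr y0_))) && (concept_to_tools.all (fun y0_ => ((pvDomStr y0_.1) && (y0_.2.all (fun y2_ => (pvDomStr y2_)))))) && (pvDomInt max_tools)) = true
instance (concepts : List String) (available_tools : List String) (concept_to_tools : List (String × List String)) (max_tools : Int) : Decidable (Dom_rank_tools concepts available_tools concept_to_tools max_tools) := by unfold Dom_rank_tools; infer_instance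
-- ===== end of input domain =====

-- B inverts the traversal (one weighted pass over the concept->tools mapping using a multiset of concepts
-- instead of per-concept dict lookups with linear membership scans) and replaces the comparison sort of
-- (-score, name) pairs by distribution selection over score buckets; A's dead fallback loop is dropped.
-- On negative max_tools A's accidental double negative slice differs (see D_).


-- ===== PORT A =====
-- the fallback 'for concept in concepts: for tool in …: … break' loop, with both breaks on len(top_tools) >= max_tools
def rtFbInner (avail : List String) (m : Int) : List String → PySem.Set String → List String → PySem.Set String × List String
  | [], s, top => (s, top)
  | t :: ts, s, top =>
    if avail.contains t && !(PySem.Set.contains s t) then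
      if m ≤ ((top ++ [t]).length : Int) then (PySem.Set.add s t, top ++ [t])
      else rtFbInner avail m ts (PySem.Set.add s t) (top ++ [t])
    else rtFbInner avail m ts s top

def rtFbOuter (d : PySem.Dict String (List String)) (avail : List String) (m : Int) :
    List String → PySem.Set String → List String → PySem.Set String × List String
  | [], s, top => (s, top)
  | c :: cs, s, top =>
    let st := rtFbInner avail m (d.getD c []) s top
    if m ≤ (st.2.length : Int) then st
    else rtFbOuter d avail m cs st.1 st.2

def rank_tools (concepts : List String) (available_tools : List String) (concept_to_tools : List (String × List String)) (max_tools : Int) : List String :=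
  if concepts = [] then
    let generic_tools := ["search_resources", "query_data", "list_tables"]
    PySem.List.slice (generic_tools.filter (fun t => available_tools.contains t)) none (some max_tools)
  else
    let d := PySem.Dict.mk concept_to_tools
    let tool_scores : PySem.Dict String Int :=
      concepts.foldl (fun sc c =>
        (d.getD c []).foldl (fun sc t =>
          if available_tools.contains t then sc.modify t 0 (· + 1) else sc) sc)
        PySem.Dict.empty
    -- key (-score, name); the name compared as its char list: same lexicographic order as Python's str <
    let ranked := PySem.List.sorted2 tool_scores.items (fun p => -p.2) (fun p => p.1.toList)
    let top_tools := (PySem.List.slice ranked none (some max_tools)).map (fun p => p.1)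
    let top_tools :=
      if (top_tools.length : Int) < max_tools then
        (rtFbOuter d available_tools max_tools concepts (PySem.Set.ofList top_tools) top_tools).2
      else top_tools
    PySem.List.slice top_tools none (some max_tools)

-- ===== PORT B =====
-- scores = {}; for concept, tools in concept_to_tools.items(): w = weight[concept]; if w: for tool in tools: if tool in avail: scores[tool] = scores.get(tool, 0) + w
def rtScores (concepts : List String) (available_tools : List String) (concept_to_tools : List (String × List String)) : PySem.Dict String Int :=
  let weight := PySem.Dict.counter concepts
  let avail := PySem.Set.ofList available_tools
  (PySem.Dict.mk concept_to_tools).items.foldl (fun sc p =>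
    let w := weight.getD p.1 0
    if w ≠ 0 then
      p.2.foldl (fun sc t => if PySem.Set.contains avail t then sc.modify t 0 (· + w) else sc) sc
    else sc) PySem.Dict.empty

-- buckets = defaultdict(list); for tool, score in scores.items(): buckets[score].append(tool)
def rtBuckets (scores : PySem.Dict String Int) : PySem.Dict Int (List String) :=
  scores.items.foldl (fun b p => b.modify p.2 [] (· ++ [p.1])) PySem.Dict.empty

-- for tool in sorted(buckets[score]): if len(result) >= max_tools: return result; result.append(tool)
-- (the Bool flag marks the early 'return result')
def rtEmitInner (m : Int) : List String → List String → List String × Bool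
  | [], res => (res, false)
  | t :: ts, res => if m ≤ (res.length : Int) then (res, true) else rtEmitInner m ts (res ++ [t])
  termination_by structural ts => ts

-- for score in sorted(buckets, reverse=True): …
def rtEmitOuter (m : Int) (b : PySem.Dict Int (List String)) : List Int → List String → List String
  | [], res => res
  | s :: ss, res =>
    let r := rtEmitInner m (PySem.List.sorted (b.getD s []) (fun t => t.toList) false) res
    if r.2 then r.1 else rtEmitOuter m b ss r.1
  termination_by structural ss => ss

def rank_tools_alt (concepts : List String) (available_tools : List String) (concept_to_tools : List (String × List String)) (max_tools : Int) : List String :=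
  if concepts = [] then
    let generic_tools := ["search_resources", "query_data", "list_tables"]
    PySem.List.slice (generic_tools.filter (fun t => available_tools.contains t)) none (some max_tools)
  else
    let scores := rtScores concepts available_tools concept_to_tools
    let buckets := rtBuckets scores
    rtEmitOuter max_tools buckets (PySem.List.sorted buckets.keys (fun s => s) true) []

-- ===== PRECONDITION & SPEC =====
-- Pre_ excludes only association lists with duplicate keys: a Python dict argument can never carry two
-- entries with the same key (a duplicated literal key silently collapses), so such lists represent no
-- Python input at all and first-vs-last-entry behaviour there is purely representational.
def Pre_rank_tools (concepts : List String) (available_tools : List String) (concept_to_tools : List (String × List String)) (max_tools : Int) : Prop :=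
  (concept_to_tools.map (fun p => p.1)).Nodup
instance (concepts : List String) (available_tools : List String) (concept_to_tools : List (String × List String)) (max_tools : Int) : Decidable (Pre_rank_tools concepts available_tools concept_to_tools max_tools) := by unfold Pre_rank_tools; infer_instance

def pvWitness_rank_tools : List String × List String × (List (String × List String)) × Int :=
  (["c"], ["a", "b"], [("c", ["a", "b"])], 5)

-- On negative max_tools with concepts matched and more than 2*|max_tools| distinct matched available tools,
-- A returns the scored-tool ranking truncated TWICE by a negative slice (an accident of slicing ranked[:m]
-- and then top_tools[:m] again), while B returns [] — the intended reading of a non-positive tool budget.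
def D_rank_tools (concepts : List String) (available_tools : List String) (concept_to_tools : List (String × List String)) (max_tools : Int) : Prop :=
  max_tools < 0 ∧ concepts ≠ [] ∧
    2 * (-max_tools) < (((concept_to_tools.flatMap (fun p => p.2)).dedup.filter
      (fun t => available_tools.contains t && decide (∃ c ∈ concepts, t ∈ (concept_to_tools.lookup c).getD []))).length : Int)
instance (concepts : List String) (available_tools : List String) (concept_to_tools : List (String × List String)) (max_tools : Int) : Decidable (D_rank_tools concepts available_tools concept_to_tools max_tools) := by unfold D_rank_tools; infer_instance

def Spec_rank_tools (concepts : List String) (available_tools : List String) (concept_to_tools : List (String × List String)) (max_tools : Int) (out : List String) : Prop := ¬ D_rank_tools concepts available_tools concept_to_tools max_tools → out = rank_tools_alt concepts available_tools concept_to_tools max_tools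
instance (concepts : List String) (available_tools : List String) (concept_to_tools : List (String × List String)) (max_tools : Int) (out : List String) : Decidable (Spec_rank_tools concepts available_tools concept_to_tools max_tools out) := by unfold Spec_rank_tools; infer_instance

def pvDiffWitness_rank_tools : List String × List String × (List (String × List String)) × Int :=
  (["c"], ["a", "b", "c"], [("c", ["a", "b", "c"])], -1)
def pvDiffWitnessOut_rank_tools : (List String) × (List String) := (["a"], [])

-- ===== CLAIM (what is proved, stated in full; the proofs are below) =====
def Claim_unchanged_rank_tools : Prop := ∀ (concepts : List String) (available_tools : List String) (concept_to_tools : List (String × List String)) (max_tools : Int), Dom_rank_tools concepts available_tools concept_to_tools max_tools → Pre_rank_tools concepts available_tools concept_to_tools max_tools → Spec_rank_tools concepts available_tools concept_to_tools max_tools (rank_tools concepts available_tools concept_to_tools max_tools)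
def Claim_changed_rank_tools : Prop := Dom_rank_tools (pvDiffWitness_rank_tools.1) (pvDiffWitness_rank_tools.2.1) (pvDiffWitness_rank_tools.2.2.1) (pvDiffWitness_rank_tools.2.2.2) ∧ Pre_rank_tools (pvDiffWitness_rank_tools.1) (pvDiffWitness_rank_tools.2.1) (pvDiffWitness_rank_tools.2.2.1) (pvDiffWitness_rank_tools.2.2.2) ∧ D_rank_tools (pvDiffWitness_rank_tools.1) (pvDiffWitness_rank_tools.2.1) (pvDiffWitness_rank_tools.2.2.1) (pvDiffWitness_rank_tools.2.2.2) ∧ rank_tools (pvDiffWitness_rank_tools.1) (pvDiffWitness_rank_tools.2.1) (pvDiffWitness_rank_tools.2.2.1) (pvDiffWitness_rank_tools.2.2.2) = pvDiffWitnessOut_rank_tools.1 ∧ rank_tools_alt (pvDiffWitness_rank_tools.1) (pvDiffWitness_rank_tools.2.1) (pvDiffWitness_rank_tools.2.2.1) (pvDiffWitness_rank_tools.2.2.2) = pvDiffWitnessOut_rank_tools.2 ∧ pvDiffWitnessOut_rank_tools.1 ≠ pvDiffWitnessOut_rank_tools.2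
def Claim_exact_rank_tools : Prop := ∀ (concepts : List String) (available_tools : List String) (concept_to_tools : List (String × List String)) (max_tools : Int), Dom_rank_tools concepts available_tools concept_to_tools max_tools → Pre_rank_tools concepts available_tools concept_to_tools max_tools → D_rank_tools concepts available_tools concept_to_tools max_tools → rank_tools concepts available_tools concept_to_tools max_tools ≠ rank_tools_alt concepts available_tools concept_to_tools max_tools

-- ===== LEMMAS AND PROOFS =====

-- the filtered stream of matched available tools, as program A enumerates it
def rtFlat (concepts : List String) (available_tools : List String) (ctt : List (String × List String)) : List String :=
  concepts.flatMap (fun c => ((PySem.Dict.mk ctt).getD c []).filter (fun t => available_tools.contains t))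

-- the strict order A sorts by: higher score first, then name
def rtLT2 (p q : String × Int) : Prop :=
  -p.2 < -q.2 ∨ (-p.2 = -q.2 ∧ p.1.toList < q.1.toList)


theorem rt_set_contains_ofList (xs : List String) (t : String) :
    PySem.Set.contains (PySem.Set.ofList xs) t = xs.contains t := by
  simp only [PySem.Set.contains]
  rw [Bool.eq_iff_iff]
  simp [PySem.Set.mem_ofList xs t]

theorem rt_scores_eq (concepts : List String) (available_tools : List String) (ctt : List (String × List String)) :
    concepts.foldl (fun sc c => (((PySem.Dict.mk ctt)).getD c []).foldl
        (fun sc t => if available_tools.contains t then sc.modify t 0 (· + 1) else sc) sc) PySem.Dict.empty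
      = PySem.Dict.counter (rtFlat concepts available_tools ctt) := by
  rw [rtFlat, PySem.Dict.counter_eq_foldl, List.foldl_flatMap]
  refine PySem.List.foldl_congr_mem _ _ _ _ ?_
  intro sc c _
  exact PySem.List.foldl_if_eq_foldl_filter (fun t => available_tools.contains t)
    (fun (sc : PySem.Dict String Int) (t : String) => sc.modify t 0 (· + 1)) _ sc

theorem rt_names_perm (concepts : List String) (available_tools : List String) (ctt : List (String × List String)) :
    ((PySem.List.sorted2 (PySem.Dict.counter (rtFlat concepts available_tools ctt)).items
        (fun p => -p.2) (fun p => p.1.toList)).map (fun p => p.1)).Perm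
      (PySem.Set.ofList (rtFlat concepts available_tools ctt)) := by
  have h1 := (PySem.List.sorted2_perm (PySem.Dict.counter (rtFlat concepts available_tools ctt)).items
      (fun p => -p.2) (fun p => p.1.toList) false).map (fun p : String × Int => p.1)
  have h2 : (PySem.Dict.counter (rtFlat concepts available_tools ctt)).items.map
      (fun p : String × Int => p.1) = PySem.Set.ofList (rtFlat concepts available_tools ctt) := by
    rw [PySem.Dict.items_counter]
    simp [List.map_map, Function.comp_def]
  rw [h2] at h1
  exact h1

theorem rt_get_lookup (ctt : List (String × List String)) (c : String) :
    (PySem.Dict.mk ctt).get? c = ctt.lookup c := by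
  induction ctt with
  | nil => rfl
  | cons p rest ih =>
    rw [show (p :: rest) = ((p.1, p.2) :: rest) from rfl, PySem.Dict.get?_mk_cons]
    by_cases h : p.1 = c
    · simp [List.lookup, h]
    · have h' : (c == p.1) = false := by
        exact beq_eq_false_iff_ne.2 (fun hh => h hh.symm)
      simp [List.lookup, h, h', ih]

theorem rt_getD_lookup (ctt : List (String × List String)) (c : String) :
    (PySem.Dict.mk ctt).getD c [] = (ctt.lookup c).getD [] := by
  rw [PySem.Dict.getD_eq_get?_getD, rt_get_lookup]

theorem rt_lookup_some_mem (ctt : List (String × List String)) (c : String) (v : List String)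
    (h : ctt.lookup c = some v) : v ∈ ctt.map (fun p => p.2) := by
  induction ctt with
  | nil => simp [List.lookup] at h
  | cons p rest ih =>
    rw [List.lookup] at h
    cases hb : (c == p.1) with
    | true => rw [hb] at h; simp only [Option.some.injEq] at h; simp [← h]
    | false => rw [hb] at h; exact List.mem_cons_of_mem _ (ih h)

theorem rt_count_eq (concepts : List String) (available_tools : List String) (ctt : List (String × List String)) :
    ((ctt.flatMap (fun p => p.2)).dedup.filter
        (fun t => available_tools.contains t && decide (∃ c ∈ concepts, t ∈ (ctt.lookup c).getD []))).length
      = (PySem.Set.ofList (rtFlat concepts available_tools ctt)).length := by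
  have h1 : ((ctt.flatMap (fun p => p.2)).dedup.filter
      (fun t => available_tools.contains t && decide (∃ c ∈ concepts, t ∈ (ctt.lookup c).getD []))).Nodup :=
    (List.nodup_dedup _).filter _
  have h2 : (PySem.Set.ofList (rtFlat concepts available_tools ctt)).Nodup :=
    PySem.Set.nodup_ofList _
  have hmem : ∀ t : String, (t ∈ (ctt.flatMap (fun p => p.2)).dedup.filter
      (fun t => available_tools.contains t && decide (∃ c ∈ concepts, t ∈ (ctt.lookup c).getD [])))
      ↔ t ∈ PySem.Set.ofList (rtFlat concepts available_tools ctt) := by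
    intro t
    rw [PySem.Set.mem_ofList, List.mem_filter]
    constructor
    · rintro ⟨-, hP⟩
      simp only [Bool.and_eq_true, decide_eq_true_eq] at hP
      obtain ⟨hav, c, hcm, hl⟩ := hP
      exact List.mem_flatMap.2 ⟨c, hcm, List.mem_filter.2 ⟨by rw [rt_getD_lookup]; exact hl, hav⟩⟩
    · intro ht
      obtain ⟨c, hcm, htf⟩ := List.mem_flatMap.1 ht
      obtain ⟨ht', hav⟩ := List.mem_filter.1 htf
      have hl : t ∈ (ctt.lookup c).getD [] := by rw [← rt_getD_lookup]; exact ht'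
      have hd : t ∈ (ctt.flatMap (fun p => p.2)).dedup := by
        rw [List.mem_dedup]
        cases hlk : ctt.lookup c with
        | none => rw [hlk] at hl; simp at hl
        | some v =>
          rw [hlk] at hl
          obtain ⟨p, hp, hpv⟩ := List.mem_map.1 (rt_lookup_some_mem ctt c v hlk)
          exact List.mem_flatMap.2 ⟨p, hp, by rw [hpv]; simpa using hl⟩
      refine ⟨hd, ?_⟩
      simp only [Bool.and_eq_true, decide_eq_true_eq]
      exact ⟨hav, c, hcm, hl⟩
  rw [← List.toFinset_card_of_nodup h1, ← List.toFinset_card_of_nodup h2]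
  congr 1
  ext t
  simp only [List.mem_toFinset]
  exact hmem t

theorem rt_len_ranked (concepts : List String) (available_tools : List String) (ctt : List (String × List String)) :
    (PySem.List.sorted2 (PySem.Dict.counter (rtFlat concepts available_tools ctt)).items
        (fun p => -p.2) (fun p => p.1.toList)).length
      = ((ctt.flatMap (fun p => p.2)).dedup.filter
          (fun t => available_tools.contains t && decide (∃ c ∈ concepts, t ∈ (ctt.lookup c).getD []))).length := by
  have h := (rt_names_perm concepts available_tools ctt).length_eq
  simp only [List.length_map] at h
  rw [h, rt_count_eq]

theorem rt_fbInner_noop (avail : List String) (m : Int) (ts : List String) (s : PySem.Set String) (top : List String)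
    (h : ∀ t ∈ ts, avail.contains t = true → PySem.Set.contains s t = true) :
    rtFbInner avail m ts s top = (s, top) := by
  induction ts with
  | nil => rfl
  | cons t ts ih =>
    have hcond : (avail.contains t && !(PySem.Set.contains s t)) = false := by
      cases hpt : avail.contains t with
      | false => rfl
      | true => rw [h t List.mem_cons_self hpt]; rfl
    simp only [rtFbInner, hcond, Bool.false_eq_true, if_false]
    exact ih (fun t' ht' => h t' (List.mem_cons_of_mem _ ht'))

theorem rt_fbOuter_noop (d : PySem.Dict String (List String)) (avail : List String) (m : Int)
    (cs : List String) (s : PySem.Set String) (top : List String)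
    (hlen : (top.length : Int) < m)
    (h : ∀ c ∈ cs, ∀ t ∈ d.getD c [], avail.contains t = true → PySem.Set.contains s t = true) :
    rtFbOuter d avail m cs s top = (s, top) := by
  induction cs with
  | nil => rfl
  | cons c cs ih =>
    simp only [rtFbOuter, rt_fbInner_noop avail m _ s top (h c (List.mem_cons_self))]
    rw [if_neg (by omega)]
    exact ih (fun c' hc' => h c' (List.mem_cons_of_mem _ hc'))

theorem rt_A_eval_neg (concepts : List String) (available_tools : List String)
    (ctt : List (String × List String)) (m : Int) (hc : concepts ≠ []) (hm : m < 0) :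
    rank_tools concepts available_tools ctt m =
      (((PySem.List.sorted2 (PySem.Dict.counter (rtFlat concepts available_tools ctt)).items
          (fun p => -p.2) (fun p => p.1.toList)).take
            ((PySem.List.sorted2 (PySem.Dict.counter (rtFlat concepts available_tools ctt)).items
              (fun p => -p.2) (fun p => p.1.toList)).length - (-m).toNat)).map (fun p => p.1)).take
        ((((PySem.List.sorted2 (PySem.Dict.counter (rtFlat concepts available_tools ctt)).items
          (fun p => -p.2) (fun p => p.1.toList)).take
            ((PySem.List.sorted2 (PySem.Dict.counter (rtFlat concepts available_tools ctt)).items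
              (fun p => -p.2) (fun p => p.1.toList)).length - (-m).toNat)).map (fun p => p.1)).length - (-m).toNat) := by
  have hmk : m = -(((-m).toNat : Nat) : Int) := by omega
  have hk : 0 < (-m).toNat := by omega
  simp only [rank_tools, if_neg hc, rt_scores_eq]
  set ranked := PySem.List.sorted2 (PySem.Dict.counter (rtFlat concepts available_tools ctt)).items
      (fun p => -p.2) (fun p => p.1.toList) with hr
  rw [hmk, PySem.List.slice_to_neg_natCast ranked _ hk]
  rw [if_neg (by omega)]
  rw [PySem.List.slice_to_neg_natCast _ _ hk]
  simp only [neg_neg, Int.toNat_natCast]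

-- ---------- B-side: closed form of the emission loops ----------

theorem rt_emitInner_eq (m : Int) : ∀ (ts res : List String),
    rtEmitInner m ts res = (res ++ ts.take (m - res.length).toNat,
      decide (ts ≠ [] ∧ m - (res.length : Int) < ts.length)) := by
  intro ts
  induction ts with
  | nil => intro res; simp [rtEmitInner]
  | cons t ts ih =>
    intro res
    by_cases hm : m ≤ (res.length : Int)
    · have h0 : (m - (res.length : Int)).toNat = 0 := by omega
      have hd : decide ((t :: ts) ≠ [] ∧ m - (res.length : Int) < ((t :: ts).length : Int)) = true := by
        simp only [decide_eq_true_eq, List.length_cons]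
        exact ⟨by simp, by push_cast; omega⟩
      simp only [rtEmitInner, if_pos hm, h0, List.take_zero, List.append_nil, hd]
    · have hsucc : (m - (res.length : Int)).toNat = (m - ((res.length : Int) + 1)).toNat + 1 := by omega
      simp only [rtEmitInner, if_neg hm]
      rw [ih (res ++ [t])]
      have hlen : (((res ++ [t]).length : Nat) : Int) = (res.length : Int) + 1 := by
        simp
      rw [Prod.mk.injEq]
      refine ⟨?_, ?_⟩
      · rw [hlen, hsucc, List.take_succ_cons, List.append_assoc]
        rfl
      · rw [decide_eq_decide, hlen]
        simp only [ne_eq, List.length_cons]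
        constructor
        · rintro ⟨h1, h2⟩
          refine ⟨by simp, ?_⟩
          push_cast
          push_cast at h2
          omega
        · rintro ⟨h1, h2⟩
          push_cast at h2
          have hl : 1 ≤ ts.length := by omega
          refine ⟨?_, by push_cast; omega⟩
          intro h
          rw [h] at hl
          simp at hl

theorem rt_emitOuter_eq (m : Int) (b : PySem.Dict Int (List String)) : ∀ (ss : List Int) (res : List String),
    rtEmitOuter m b ss res = res ++
      (ss.flatMap (fun s => PySem.List.sorted (b.getD s []) (fun t => t.toList) false)).take (m - res.length).toNat := by
  intro ss
  induction ss with
  | nil => intro res; simp [rtEmitOuter]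
  | cons s ss ih =>
    intro res
    simp only [rtEmitOuter, List.flatMap_cons]
    generalize PySem.List.sorted (b.getD s []) (fun t => t.toList) false = ts
    rw [rt_emitInner_eq]
    by_cases hstop : (ts ≠ [] ∧ m - (res.length : Int) < (ts.length : Int))
    · rw [if_pos (by simp only [decide_eq_true_eq]; exact hstop)]
      rw [List.take_append_of_le_length (by omega)]
    · rw [if_neg (by simp only [decide_eq_true_eq]; exact hstop)]
      rw [ih]
      by_cases hts0 : ts = []
      · subst hts0; simp
      · have hge : (ts.length : Int) ≤ m - (res.length : Int) := by
          rcases not_and_or.1 hstop with h | h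
          · exact absurd hts0 (by simpa using h)
          · omega
        have htake : ts.take (m - (res.length : Int)).toNat = ts := by
          apply List.take_of_length_le; omega
        rw [htake, List.take_append]
        have h2 : (m - (((res ++ ts).length : Nat) : Int)).toNat = (m - (res.length : Int)).toNat - ts.length := by
          simp only [List.length_append]; push_cast; omega
        rw [h2, List.append_assoc, htake]

-- ---------- B-side: characterisation of sorted2 by a strictly ordered rearrangement ----------

-- the boolean comparison sorted2 uses
def rtBefore (p q : String × Int) : Bool :=
  decide (-p.2 < -q.2) || (!decide (-q.2 < -p.2) && decide (p.1.toList < q.1.toList))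

theorem rt_before_iff (p q : String × Int) : rtBefore p q = true ↔ rtLT2 p q := by
  simp only [rtBefore, rtLT2, Bool.or_eq_true, Bool.and_eq_true, Bool.not_eq_true',
    decide_eq_true_eq, decide_eq_false_iff_not]
  constructor
  · rintro (h | ⟨h1, h2⟩)
    · exact Or.inl h
    · rcases lt_trichotomy (-p.2) (-q.2) with h | h | h
      · exact Or.inl h
      · exact Or.inr ⟨h, h2⟩
      · exact absurd h h1
  · rintro (h | ⟨h1, h2⟩)
    · exact Or.inl h
    · exact Or.inr ⟨by omega, h2⟩

theorem rt_before_asymm (p q : String × Int) : rtBefore p q = true → rtBefore q p = false := by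
  intro h
  rw [rt_before_iff] at h
  rw [Bool.eq_false_iff]
  intro h2
  rw [rt_before_iff] at h2
  rcases h with h | ⟨h1, h2'⟩ <;> rcases h2 with g | ⟨g1, g2⟩ <;> try omega
  · exact absurd (lt_trans h2' g2) (lt_irrefl _)

theorem rt_before_negtrans (a b c : String × Int) :
    rtBefore b a = false → rtBefore c b = false → rtBefore c a = false := by
  intro h1 h2
  rw [Bool.eq_false_iff] at h1 h2 ⊢
  simp only [ne_eq, rt_before_iff] at h1 h2 ⊢
  simp only [rtLT2, not_or, not_and] at h1 h2 ⊢
  obtain ⟨h1a, h1b⟩ := h1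
  obtain ⟨h2a, h2b⟩ := h2
  constructor
  · omega
  · intro heq
    have hab : -b.2 = -a.2 := by omega
    have hcb : -c.2 = -b.2 := by omega
    intro hlt
    rcases lt_trichotomy (b.1.toList) (a.1.toList) with hx | hx | hx
    · exact h1b hab hx
    · exact h2b hcb (hx ▸ hlt)
    · rcases lt_trichotomy (c.1.toList) (b.1.toList) with hy | hy | hy
      · exact h2b hcb hy
      · exact h1b hab (hy ▸ hlt)
      · exact absurd (lt_trans hx hy) (fun g => absurd hlt (by
          intro _; exact absurd (lt_trans g hlt) (lt_irrefl _)))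

theorem rt_insertBy_pairwise {α : Type} (before : α → α → Bool)
    (hasym : ∀ a b, before a b = true → before b a = false)
    (hneg : ∀ a b c, before b a = false → before c b = false → before c a = false)
    (x : α) (l : List α)
    (h : l.Pairwise (fun a b => before b a = false)) :
    (PySem.List.insertBy before x l).Pairwise (fun a b => before b a = false) := by
  induction l with
  | nil => simp [PySem.List.insertBy]
  | cons y ys ih =>
    rw [List.pairwise_cons] at h
    obtain ⟨hy, hys⟩ := h
    rw [PySem.List.insertBy.eq_2]
    by_cases hxy : before x y = true
    · rw [if_pos hxy]
      refine List.Pairwise.cons ?_ (List.Pairwise.cons hy hys)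
      intro b hb
      rcases List.mem_cons.1 hb with rfl | hb
      · exact hasym _ _ hxy
      · exact hneg _ _ _ (hasym _ _ hxy) (hy b hb)
    · rw [if_neg hxy]
      refine List.Pairwise.cons ?_ (ih hys)
      intro b hb
      rcases (PySem.List.mem_insertBy before x b ys).1 hb with rfl | hb
      · exact Bool.eq_false_iff.2 hxy
      · exact hy b hb

theorem rt_foldl_insertBy_pairwise {α : Type} (before : α → α → Bool)
    (hasym : ∀ a b, before a b = true → before b a = false)
    (hneg : ∀ a b c, before b a = false → before c b = false → before c a = false)
    (xs : List α) : ∀ (acc : List α),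
    acc.Pairwise (fun a b => before b a = false) →
    (xs.foldl (fun acc x => PySem.List.insertBy before x acc) acc).Pairwise
      (fun a b => before b a = false) := by
  induction xs with
  | nil => intro acc h; exact h
  | cons x xs ih =>
    intro acc h
    exact ih _ (rt_insertBy_pairwise before hasym hneg x acc h)

theorem rt_eq_of_perm_pairwise : ∀ (l₁ l₂ : List (String × Int)), l₁.Perm l₂ →
    l₁.Pairwise rtLT2 → l₂.Pairwise (fun a b => ¬ rtLT2 b a) → l₂ = l₁ := by
  intro l₁
  induction l₁ with
  | nil => intro l₂ hp _ _; exact hp.symm.eq_nil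
  | cons a t ih =>
    intro l₂ hp h1 h2
    cases l₂ with
    | nil => exact absurd hp.symm (by simp)
    | cons c u =>
      rw [List.pairwise_cons] at h1 h2
      by_cases hac : c = a
      · subst hac
        have ht : t.Perm u := hp.cons_inv
        rw [ih u ht h1.2 h2.2]
      · have ha2 : a ∈ c :: u := hp.mem_iff.1 List.mem_cons_self
        have hau : a ∈ u := by
          rcases List.mem_cons.1 ha2 with h | h
          · exact absurd h.symm hac
          · exact h
        have hc1 : c ∈ a :: t := hp.symm.mem_iff.1 List.mem_cons_self
        have hct : c ∈ t := by
          rcases List.mem_cons.1 hc1 with h | h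
          · exact absurd h hac
          · exact h
        exact absurd (h1.1 c hct) (h2.1 a hau)

theorem rt_sorted2_eq (xs ys : List (String × Int)) (hperm : ys.Perm xs)
    (hpw : ys.Pairwise rtLT2) :
    PySem.List.sorted2 xs (fun p => -p.2) (fun p => p.1.toList) = ys := by
  have hform : PySem.List.sorted2 xs (fun p => -p.2) (fun p => p.1.toList) =
      xs.foldl (fun acc x => PySem.List.insertBy rtBefore x acc) [] := by
    rfl
  have hS : (PySem.List.sorted2 xs (fun p => -p.2) (fun p => p.1.toList)).Pairwise
      (fun a b => rtBefore b a = false) := by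
    rw [hform]
    exact rt_foldl_insertBy_pairwise rtBefore rt_before_asymm rt_before_negtrans xs [] (by simp)
  have hSp : (PySem.List.sorted2 xs (fun p => -p.2) (fun p => p.1.toList)).Pairwise
      (fun a b => ¬ rtLT2 b a) := by
    refine hS.imp ?_
    intro a b h
    rw [← rt_before_iff, h]
    simp
  have hperm2 : ys.Perm (PySem.List.sorted2 xs (fun p => -p.2) (fun p => p.1.toList)) :=
    hperm.trans (PySem.List.sorted2_perm xs _ _ false).symm
  exact rt_eq_of_perm_pairwise ys _ hperm2 hpw hSp

-- ---------- B-side: the weighted single pass computes Counter(rtFlat) ----------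

-- the (tool, weight) stream B's scoring pass feeds into the dict
def rtStream (concepts : List String) (available_tools : List String) (ctt : List (String × List String)) : List (String × Int) :=
  ctt.flatMap (fun p =>
    (if (concepts.count p.1 : Int) ≠ 0 then p.2.filter (fun t => available_tools.contains t) else []).map
      (fun t => (t, (concepts.count p.1 : Int))))

theorem rt_scores_stream (concepts : List String) (available_tools : List String) (ctt : List (String × List String)) :
    rtScores concepts available_tools ctt =
      (rtStream concepts available_tools ctt).foldl
        (fun d q => d.modify q.1 0 (· + q.2)) PySem.Dict.empty := by
  unfold rtScores rtStream
  rw [List.foldl_flatMap]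
  refine PySem.List.foldl_congr_mem _ _ _ _ ?_
  intro sc p _
  simp only [PySem.Dict.getD_counter]
  by_cases h : (concepts.count p.1 : Int) ≠ 0
  · rw [if_pos h, if_pos h, List.foldl_map]
    simp only [rt_set_contains_ofList]
    rw [PySem.List.foldl_if_eq_foldl_filter]
  · rw [if_neg h, if_neg h]
    simp

theorem rt_getD_stream_fold (l : List (String × Int)) : ∀ (d : PySem.Dict String Int) (v : String),
    (l.foldl (fun d q => d.modify q.1 0 (· + q.2)) d).getD v 0
      = d.getD v 0 + ((l.filter (fun q => q.1 == v)).map (fun q => q.2)).sum := by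
  induction l with
  | nil => intro d v; simp
  | cons q l ih =>
    intro d v
    simp only [List.foldl_cons, ih]
    by_cases h : q.1 = v
    · rw [List.filter_cons_of_pos (by simp [h])]
      rw [PySem.Dict.getD_modify]
      rw [if_pos h.symm]
      simp only [List.map_cons, List.sum_cons]
      rw [h]
      ring
    · rw [List.filter_cons_of_neg (by simp [h])]
      rw [PySem.Dict.getD_modify, if_neg (fun hh => h hh.symm)]

theorem rt_scores_keys (concepts : List String) (available_tools : List String) (ctt : List (String × List String)) :
    (rtScores concepts available_tools ctt).keys
      = PySem.Set.ofList ((rtStream concepts available_tools ctt).map (fun q => q.1)) := by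
  rw [rt_scores_stream]
  have h := PySem.Dict.keys_foldl_modify_key (rtStream concepts available_tools ctt)
    (fun q : String × Int => q.1) (0 : Int) (fun _ q => (· + q.2)) PySem.Dict.empty
  rw [PySem.Dict.keys_empty, PySem.Set.update_nil_left] at h
  exact h

theorem rt_stream_fst_mem (concepts : List String) (available_tools : List String)
    (ctt : List (String × List String)) (hnd : (ctt.map (fun p => p.1)).Nodup) (t : String) :
    t ∈ (rtStream concepts available_tools ctt).map (fun q => q.1)
      ↔ t ∈ rtFlat concepts available_tools ctt := by
  have hndk : (PySem.Dict.mk ctt).keys.Nodup := hnd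
  constructor
  · intro h
    obtain ⟨q, hq0, rfl⟩ := List.mem_map.1 h
    simp only [rtStream] at hq0
    obtain ⟨p, hp, hq⟩ := List.mem_flatMap.1 hq0
    by_cases hw : (concepts.count p.1 : Int) ≠ 0
    · rw [if_pos hw] at hq
      obtain ⟨x, hx, hxe⟩ := List.mem_map.1 hq
      subst hxe
      have hc : p.1 ∈ concepts := by
        by_contra hnc
        exact hw (by rw [List.count_eq_zero.2 hnc]; rfl)
      have hgd : (PySem.Dict.mk ctt).getD p.1 [] = p.2 :=
        PySem.Dict.getD_of_mem_items _ (by rw [Prod.eta]; exact hp) hndk []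
      exact List.mem_flatMap.2 ⟨p.1, hc, by rw [hgd]; exact hx⟩
    · rw [if_neg hw] at hq
      simp at hq
  · intro h
    obtain ⟨c, hcm, ht⟩ := List.mem_flatMap.1 h
    cases hg : (PySem.Dict.mk ctt).get? c with
    | none =>
      rw [PySem.Dict.getD_eq_get?_getD, hg] at ht
      simp at ht
    | some ts =>
      have hmem : (c, ts) ∈ ctt := PySem.Dict.mem_items_of_get?_eq_some _ hg
      have hgd : (PySem.Dict.mk ctt).getD c [] = ts := PySem.Dict.getD_of_get?_eq_some _ [] hg
      rw [hgd] at ht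
      have hw : (concepts.count c : Int) ≠ 0 := by
        have hpos : 0 < concepts.count c := List.count_pos_iff.2 hcm
        omega
      simp only [rtStream, List.mem_map, List.mem_flatMap]
      exact ⟨(t, (concepts.count c : Int)),
        ⟨(c, ts), hmem, by rw [if_pos hw]; exact ⟨t, ht, rfl⟩⟩, rfl⟩

theorem rt_sum_map_const_int (l : List String) (w : Int) : (l.map (fun _ => w)).sum = w * l.length := by
  induction l with
  | nil => simp
  | cons a l ih =>
    simp only [List.map_cons, List.sum_cons, ih, List.length_cons]
    push_cast
    ring

theorem rt_filter_count (l : List String) (t : String) :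
    (l.filter (fun x => x == t)).length = l.count t := by
  rw [List.count, List.countP_eq_length_filter]

theorem rt_count_flatMap {α β : Type} [BEq β] [LawfulBEq β] (l : List α) (g : α → List β) (t : β) :
    (l.flatMap g).count t = (l.map (fun x => (g x).count t)).sum := by
  induction l with
  | nil => simp
  | cons a l ih => simp [List.flatMap_cons, List.count_append, ih]

theorem rt_sum_filter_flatMap {α : Type} (l : List α) (f : α → List (String × Int)) (pr : String × Int → Bool) :
    (((l.flatMap f).filter pr).map (fun q => q.2)).sum
      = (l.map (fun x => (((f x).filter pr).map (fun q => q.2)).sum)).sum := by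
  induction l with
  | nil => simp
  | cons a l ih =>
    simp [List.flatMap_cons, List.filter_append, List.map_append, List.sum_append, ih]

theorem rt_zero_sum (c : String) (g : String → Nat) (l : List (String × List String))
    (h : c ∉ l.map (fun p => p.1)) :
    (l.map (fun p => if p.1 = c then g p.1 else 0)).sum = 0 := by
  induction l with
  | nil => simp
  | cons p l ih =>
    simp only [List.map_cons, List.mem_cons, not_or] at h
    simp only [List.map_cons, List.sum_cons]
    rw [if_neg (fun hh => h.1 hh.symm), ih h.2]

theorem rt_one_sum (c : String) (g : String → Nat) (l : List (String × List String))
    (hnd : (l.map (fun p => p.1)).Nodup) :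
    (l.map (fun p => if p.1 = c then g p.1 else 0)).sum
      = if c ∈ l.map (fun p => p.1) then g c else 0 := by
  induction l with
  | nil => simp
  | cons p l ih =>
    simp only [List.map_cons, List.nodup_cons] at hnd
    simp only [List.map_cons, List.sum_cons]
    by_cases h : p.1 = c
    · rw [if_pos h, rt_zero_sum c g l (h ▸ hnd.1), if_pos (by simp [h])]
      rw [h]
      omega
    · rw [if_neg h, ih hnd.2]
      have hmem : (c ∈ p.1 :: l.map (fun p => p.1)) ↔ c ∈ l.map (fun p => p.1) := by
        rw [List.mem_cons]
        constructor
        · rintro (h1 | h1)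
          · exact absurd h1.symm h
          · exact h1
        · exact Or.inr
      simp only [List.map_cons, hmem]
      rw [Nat.zero_add]

theorem rt_regroup (g : String → Nat) (ctt : List (String × List String))
    (hnd : (ctt.map (fun p => p.1)).Nodup)
    (h0 : ∀ c, c ∉ ctt.map (fun p => p.1) → g c = 0) : ∀ (cs : List String),
    (cs.map g).sum = (ctt.map (fun p => cs.count p.1 * g p.1)).sum := by
  intro cs
  induction cs with
  | nil => simp
  | cons c cs ih =>
    simp only [List.map_cons, List.sum_cons, ih]
    have hsplit : (ctt.map (fun p => (c :: cs).count p.1 * g p.1)).sum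
        = (ctt.map (fun p => cs.count p.1 * g p.1)).sum
          + (ctt.map (fun p => if p.1 = c then g p.1 else 0)).sum := by
      rw [← List.sum_map_add]
      apply congrArg
      apply List.map_congr_left
      intro p _
      rw [List.count_cons]
      by_cases h : p.1 = c
      · rw [if_pos (by simp [h]), if_pos h]
        ring
      · rw [if_neg (by simp only [beq_iff_eq]; exact fun hh => h hh.symm), if_neg h]
        ring
    rw [hsplit, rt_one_sum c g ctt hnd]
    by_cases hcm : c ∈ ctt.map (fun p => p.1)
    · rw [if_pos hcm]
      omega
    · rw [if_neg hcm, h0 c hcm]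
      omega

theorem rt_getD_scores (concepts : List String) (available_tools : List String)
    (ctt : List (String × List String)) (hnd : (ctt.map (fun p => p.1)).Nodup) (t : String) :
    (rtScores concepts available_tools ctt).getD t 0
      = ((rtFlat concepts available_tools ctt).count t : Int) := by
  have hndk : (PySem.Dict.mk ctt).keys.Nodup := hnd
  rw [rt_scores_stream, rt_getD_stream_fold, PySem.Dict.getD_empty, zero_add]
  rw [rtStream, rt_sum_filter_flatMap]
  -- each mapping entry contributes weight * matches
  have hterm : ∀ p ∈ ctt,
      ((((if (concepts.count p.1 : Int) ≠ 0 then p.2.filter (fun t => available_tools.contains t) else []).map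
          (fun t => (t, (concepts.count p.1 : Int)))).filter (fun q => q.1 == t)).map (fun q => q.2)).sum
        = (concepts.count p.1 : Int) * (((p.2.filter (fun t => available_tools.contains t)).count t : Nat) : Int) := by
    intro p _
    by_cases hw : (concepts.count p.1 : Int) ≠ 0
    · rw [if_pos hw, List.filter_map]
      have hcomp : ((fun q : String × Int => q.1 == t) ∘ (fun x => (x, (concepts.count p.1 : Int))))
          = fun x => x == t := rfl
      rw [hcomp, List.map_map]
      have hcomp2 : ((fun q : String × Int => q.2) ∘ (fun x : String => (x, (concepts.count p.1 : Int))))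
          = fun _ => (concepts.count p.1 : Int) := rfl
      rw [hcomp2, rt_sum_map_const_int, rt_filter_count]
    · rw [if_neg hw]
      rw [ne_eq, not_not] at hw
      rw [hw]
      simp
  rw [List.map_congr_left hterm]
  -- the flat stream's count, regrouped over the mapping
  have hflat : ((rtFlat concepts available_tools ctt).count t : Nat)
      = (concepts.map (fun c => (((PySem.Dict.mk ctt).getD c []).filter (fun t' => available_tools.contains t')).count t)).sum := by
    rw [rtFlat, rt_count_flatMap]
  have h0 : ∀ c, c ∉ ctt.map (fun p => p.1) →
      (((PySem.Dict.mk ctt).getD c []).filter (fun t' => available_tools.contains t')).count t = 0 := by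
    intro c hcm
    have hg : (PySem.Dict.mk ctt).get? c = none := (PySem.Dict.get?_eq_none_iff_not_mem_keys _ _).2 hcm
    rw [PySem.Dict.getD_eq_get?_getD, hg]
    rfl
  have hreg := rt_regroup (fun c => (((PySem.Dict.mk ctt).getD c []).filter (fun t' => available_tools.contains t')).count t)
    ctt hnd h0 concepts
  rw [hflat, hreg]
  -- pointwise: the entry's own tool list is its getD value (unique keys)
  have hpt : ∀ p ∈ ctt,
      concepts.count p.1 * (((PySem.Dict.mk ctt).getD p.1 []).filter (fun t' => available_tools.contains t')).count t
        = concepts.count p.1 * ((p.2.filter (fun t' => available_tools.contains t')).count t) := by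
    intro p hp
    rw [PySem.Dict.getD_of_mem_items _ (by rw [Prod.eta]; exact hp) hndk []]
  rw [List.map_congr_left hpt]
  rw [Nat.cast_list_sum, List.map_map]
  apply congrArg
  apply List.map_congr_left
  intro p _
  simp only [Function.comp_apply]
  push_cast
  rfl

theorem rt_items_perm (concepts : List String) (available_tools : List String)
    (ctt : List (String × List String)) (hnd : (ctt.map (fun p => p.1)).Nodup) :
    (rtScores concepts available_tools ctt).items.Perm
      (PySem.Dict.counter (rtFlat concepts available_tools ctt)).items := by
  have hkeysS := rt_scores_keys concepts available_tools ctt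
  have hndS : (rtScores concepts available_tools ctt).keys.Nodup := by
    rw [hkeysS]; exact PySem.Set.nodup_ofList _
  rw [PySem.Dict.items_eq_map_keys _ hndS 0, PySem.Dict.items_counter]
  have hfun : (rtScores concepts available_tools ctt).keys.map
        (fun k => (k, (rtScores concepts available_tools ctt).getD k 0))
      = (rtScores concepts available_tools ctt).keys.map
        (fun k => (k, ((rtFlat concepts available_tools ctt).count k : Int))) := by
    apply List.map_congr_left
    intro k _
    rw [rt_getD_scores concepts available_tools ctt hnd k]
  rw [hfun]
  apply List.Perm.map
  rw [hkeysS]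
  apply (List.perm_ext_iff_of_nodup (PySem.Set.nodup_ofList _) (PySem.Set.nodup_ofList _)).2
  intro a
  rw [PySem.Set.mem_ofList, PySem.Set.mem_ofList]
  exact rt_stream_fst_mem concepts available_tools ctt hnd a

-- ---------- B-side: buckets and the emitted order ----------

theorem rt_buckets_eq_swap (d : PySem.Dict String Int) :
    rtBuckets d = (d.items.map Prod.swap).foldl
      (fun b q => b.modify q.1 [] (· ++ [q.2])) PySem.Dict.empty := by
  rw [List.foldl_map]
  rfl

theorem rt_buckets_getD (d : PySem.Dict String Int) (s : Int) :
    (rtBuckets d).getD s [] = (d.items.filter (fun p => p.2 == s)).map (fun p => p.1) := by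
  rw [rt_buckets_eq_swap, PySem.Dict.getD_foldl_modify_append, PySem.Dict.getD_empty, List.nil_append]
  rw [List.filter_map]
  have hcomp : ((fun q : Int × String => q.1 == s) ∘ Prod.swap) = fun p : String × Int => p.2 == s := rfl
  rw [hcomp, List.map_map]
  rfl

theorem rt_buckets_keys (d : PySem.Dict String Int) :
    (rtBuckets d).keys = PySem.Set.ofList (d.items.map (fun p => p.2)) := by
  have h := PySem.Dict.keys_foldl_modify_key d.items (fun p : String × Int => p.2)
    ([] : List String) (fun _ p => (· ++ [p.1])) PySem.Dict.empty
  rw [PySem.Dict.keys_empty, PySem.Set.update_nil_left] at h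
  exact h

theorem rt_cnt (SI : List (String × Int)) : ∀ (ks : List Int), ks.Nodup → ∀ q : String × Int,
    (ks.flatMap (fun s => SI.filter (fun p => p.2 == s))).count q
      = if q.2 ∈ ks then SI.count q else 0 := by
  intro ks
  induction ks with
  | nil => intro _ q; simp
  | cons s ks ih =>
    intro hnd q
    have hnd' := List.nodup_cons.1 hnd
    rw [List.flatMap_cons, List.count_append, ih hnd'.2 q]
    by_cases hq : q.2 = s
    · have h1 : (SI.filter (fun p => p.2 == s)).count q = SI.count q :=
        List.count_filter (by simp [hq])
      have h2 : q.2 ∉ ks := hq ▸ hnd'.1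
      rw [h1, if_neg h2, if_pos (by simp [hq])]
      omega
    · have h1 : (SI.filter (fun p => p.2 == s)).count q = 0 := by
        apply List.count_eq_zero.2
        intro hmem
        exact hq (by simpa using (List.mem_filter.1 hmem).2)
      have hmem : (q.2 ∈ s :: ks) ↔ q.2 ∈ ks := by simp [hq]
      rw [h1]
      simp only [hmem]
      omega

theorem rt_group_perm (SI : List (String × Int)) (ks : List Int) (hnd : ks.Nodup)
    (hcov : ∀ p ∈ SI, p.2 ∈ ks) :
    (ks.flatMap (fun s => SI.filter (fun p => p.2 == s))).Perm SI := by
  rw [List.perm_iff_count]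
  intro q
  rw [rt_cnt SI ks hnd q]
  by_cases h : q ∈ SI
  · rw [if_pos (hcov q h)]
  · rw [List.count_eq_zero.2 h]
    split_ifs <;> simp [List.count_eq_zero.2 h]

theorem rt_sorted_str_pairwise_lt (l : List String) (hnd : l.Nodup) :
    (PySem.List.sorted l (fun t => t.toList) false).Pairwise (fun a b => a.toList < b.toList) := by
  have hasym : ∀ a b : String, (decide (a.toList < b.toList)) = true → (decide (b.toList < a.toList)) = false := by
    intro a b h
    rw [decide_eq_true_eq] at h
    rw [decide_eq_false_iff_not]
    exact lt_asymm h
  have hneg : ∀ a b c : String, (decide (b.toList < a.toList)) = false → (decide (c.toList < b.toList)) = false →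
      (decide (c.toList < a.toList)) = false := by
    intro a b c h1 h2
    rw [decide_eq_false_iff_not] at h1 h2
    rw [decide_eq_false_iff_not]
    intro hca
    rcases lt_trichotomy (b.toList) (a.toList) with h | h | h
    · exact h1 h
    · exact h2 (h ▸ hca)
    · rcases lt_trichotomy (c.toList) (b.toList) with h' | h' | h'
      · exact h2 h'
      · exact h1 (h' ▸ hca)
      · exact h2 (lt_trans hca h)
  have hform := PySem.List.sorted_eq_foldl_insertBy l (fun t : String => t.toList)
  have hpw : (PySem.List.sorted l (fun t => t.toList) false).Pairwise
      (fun a b => (decide (b.toList < a.toList)) = false) := by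
    rw [hform]
    exact rt_foldl_insertBy_pairwise (fun a b : String => decide (a.toList < b.toList)) hasym hneg l [] (by simp)
  have hnd2 : (PySem.List.sorted l (fun t => t.toList) false).Nodup :=
    ((PySem.List.sorted_perm l (fun t => t.toList) false).nodup_iff).2 hnd
  refine (hpw.and hnd2).imp ?_
  intro a b hab
  rw [decide_eq_false_iff_not] at hab
  rcases lt_trichotomy (a.toList) (b.toList) with h | h | h
  · exact h
  · exact absurd (String.toList_inj.mp h) hab.2
  · exact absurd h hab.1

theorem rt_emit_eq_sorted2 (d : PySem.Dict String Int)
    (hnd : (d.items.map (fun p => p.1)).Nodup) :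
    ((PySem.List.sorted (rtBuckets d).keys (fun s => s) true).flatMap
        (fun s => PySem.List.sorted ((rtBuckets d).getD s []) (fun t => t.toList) false))
      = (PySem.List.sorted2 d.items (fun p => -p.2) (fun p => p.1.toList)).map (fun p => p.1) := by
  simp only [rt_buckets_getD, rt_buckets_keys]
  set SI := d.items with hSI
  set ks := PySem.List.sorted (PySem.Set.ofList (SI.map (fun p => p.2))) (fun s => s) true with hks
  have hnames_nodup : ∀ s : Int, ((SI.filter (fun p => p.2 == s)).map (fun p => p.1)).Nodup :=
    fun s => List.Nodup.sublist (List.Sublist.map _ List.filter_sublist) hnd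
  have hks_nodup : ks.Nodup :=
    ((PySem.List.sorted_perm _ _ true).nodup_iff).2 (PySem.Set.nodup_ofList _)
  have hks_pw : ks.Pairwise (fun a b => b < a) := by
    have h1 : ks.Pairwise (fun a b => b ≤ a) := PySem.List.sorted_pairwise_rev _ _
    exact (h1.and hks_nodup).imp (fun h => lt_of_le_of_ne h.1 (Ne.symm h.2))
  have hA : ks.flatMap (fun s => PySem.List.sorted ((SI.filter (fun p => p.2 == s)).map (fun p => p.1)) (fun t => t.toList) false)
      = (ks.flatMap (fun s => (PySem.List.sorted ((SI.filter (fun p => p.2 == s)).map (fun p => p.1)) (fun t => t.toList) false).map (fun t => (t, s)))).map (fun p => p.1) := by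
    rw [List.map_flatMap]
    congr 1
    funext s
    rw [List.map_map]
    simp [Function.comp_def]
  have hpair : (ks.flatMap (fun s => (PySem.List.sorted ((SI.filter (fun p => p.2 == s)).map (fun p => p.1)) (fun t => t.toList) false).map (fun t => (t, s)))).Pairwise rtLT2 := by
    rw [List.pairwise_flatMap]
    constructor
    · intro s _
      rw [List.pairwise_map]
      refine (rt_sorted_str_pairwise_lt _ (hnames_nodup s)).imp ?_
      intro a b hab
      exact Or.inr ⟨rfl, hab⟩
    · refine hks_pw.imp ?_
      intro s1 s2 hlt x hx y hy
      obtain ⟨t1, -, rfl⟩ := List.mem_map.1 hx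
      obtain ⟨t2, -, rfl⟩ := List.mem_map.1 hy
      exact Or.inl (by simp only; omega)
  have hperm : (ks.flatMap (fun s => (PySem.List.sorted ((SI.filter (fun p => p.2 == s)).map (fun p => p.1)) (fun t => t.toList) false).map (fun t => (t, s)))).Perm SI := by
    have hinner : ∀ s ∈ ks,
        ((PySem.List.sorted ((SI.filter (fun p => p.2 == s)).map (fun p => p.1)) (fun t => t.toList) false).map (fun t => (t, s))).Perm
          (SI.filter (fun p => p.2 == s)) := by
      intro s _
      have h1 := (PySem.List.sorted_perm ((SI.filter (fun p => p.2 == s)).map (fun p => p.1)) (fun t => t.toList) false).map (fun t => (t, s))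
      have h2 : ((SI.filter (fun p => p.2 == s)).map (fun p => p.1)).map (fun t => (t, s))
          = SI.filter (fun p => p.2 == s) := by
        rw [List.map_map]
        have : ∀ p ∈ SI.filter (fun p => p.2 == s), ((fun t => (t, s)) ∘ (fun p : String × Int => p.1)) p = id p := by
          intro p hp
          have hs : p.2 = s := by simpa using (List.mem_filter.1 hp).2
          simp only [Function.comp_apply, id_eq, ← hs, Prod.eta]
        rw [List.map_congr_left this, List.map_id]
      refine h1.trans ?_
      rw [h2]
    have hstep1 := List.Perm.flatMap_left ks hinner
    have hstep2 := List.Perm.flatMap_right (fun s => SI.filter (fun p => p.2 == s))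
      (PySem.List.sorted_perm (PySem.Set.ofList (SI.map (fun p => p.2))) (fun s => s) true)
    have hstep3 : ((PySem.Set.ofList (SI.map (fun p => p.2))).flatMap (fun s => SI.filter (fun p => p.2 == s))).Perm SI := by
      apply rt_group_perm SI _ (PySem.Set.nodup_ofList _)
      intro p hp
      exact (PySem.Set.mem_ofList _ _).2 (List.mem_map_of_mem hp)
    exact hstep1.trans (hstep2.trans hstep3)
  rw [hA, rt_sorted2_eq SI _ hperm hpair]

theorem rt_sorted2_pairwise_not (xs : List (String × Int)) :
    (PySem.List.sorted2 xs (fun p => -p.2) (fun p => p.1.toList)).Pairwise (fun a b => ¬ rtLT2 b a) := by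
  have hform : PySem.List.sorted2 xs (fun p => -p.2) (fun p => p.1.toList) =
      xs.foldl (fun acc x => PySem.List.insertBy rtBefore x acc) [] := rfl
  have hS : (PySem.List.sorted2 xs (fun p => -p.2) (fun p => p.1.toList)).Pairwise
      (fun a b => rtBefore b a = false) := by
    rw [hform]
    exact rt_foldl_insertBy_pairwise rtBefore rt_before_asymm rt_before_negtrans xs [] (by simp)
  refine hS.imp ?_
  intro a b h
  rw [← rt_before_iff, h]
  simp

theorem rt_LT2_resolve (a b : String × Int) (hn : ¬ rtLT2 b a) (hne : a.1 ≠ b.1) : rtLT2 a b := by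
  simp only [rtLT2, not_or, not_and] at hn ⊢
  rcases lt_trichotomy (-a.2) (-b.2) with h | h | h
  · exact Or.inl h
  · rcases lt_trichotomy (a.1.toList) (b.1.toList) with h2 | h2 | h2
    · exact Or.inr ⟨h, h2⟩
    · exact absurd (String.toList_inj.mp h2) hne
    · exact absurd h2 (hn.2 (by omega))
  · exact absurd h (by simpa using hn.1)

theorem rt_sorted2_congr (xs ys : List (String × Int)) (hx : (xs.map (fun p => p.1)).Nodup)
    (hperm : xs.Perm ys) :
    PySem.List.sorted2 xs (fun p => -p.2) (fun p => p.1.toList)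
      = PySem.List.sorted2 ys (fun p => -p.2) (fun p => p.1.toList) := by
  symm
  apply rt_sorted2_eq
  · exact (PySem.List.sorted2_perm xs _ _ false).trans hperm
  · -- the sorted list of xs, with all-distinct names, is strictly ordered
    have h1 := rt_sorted2_pairwise_not xs
    have h2 : ((PySem.List.sorted2 xs (fun p => -p.2) (fun p => p.1.toList)).map (fun p => p.1)).Nodup := by
      refine (((PySem.List.sorted2_perm xs (fun p => -p.2) (fun p => p.1.toList) false).map (fun p => p.1)).nodup_iff).2 hx
    exact (h1.and (List.pairwise_map.1 h2)).imp (fun h => rt_LT2_resolve _ _ h.1 h.2)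

theorem rt_B_eval (concepts : List String) (available_tools : List String)
    (ctt : List (String × List String)) (m : Int) (hc : concepts ≠ []) :
    rank_tools_alt concepts available_tools ctt m =
      ((PySem.List.sorted (rtBuckets (rtScores concepts available_tools ctt)).keys (fun s => s) true).flatMap
        (fun s => PySem.List.sorted ((rtBuckets (rtScores concepts available_tools ctt)).getD s []) (fun t => t.toList) false)).take m.toNat := by
  simp only [rank_tools_alt, if_neg hc]
  rw [rt_emitOuter_eq]
  simp

theorem rt_B_eval_nonpos (concepts : List String) (available_tools : List String)
    (ctt : List (String × List String)) (m : Int) (hc : concepts ≠ []) (hm : m ≤ 0) :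
    rank_tools_alt concepts available_tools ctt m = [] := by
  rw [rt_B_eval concepts available_tools ctt m hc]
  have : m.toNat = 0 := by omega
  rw [this, List.take_zero]

theorem rt_B_eval_main (concepts : List String) (available_tools : List String)
    (ctt : List (String × List String)) (m : Int) (hc : concepts ≠ [])
    (hnd : (ctt.map (fun p => p.1)).Nodup) :
    rank_tools_alt concepts available_tools ctt m =
      ((PySem.List.sorted2 (PySem.Dict.counter (rtFlat concepts available_tools ctt)).items
        (fun p => -p.2) (fun p => p.1.toList)).map (fun p => p.1)).take m.toNat := by
  rw [rt_B_eval concepts available_tools ctt m hc]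
  have hndS : ((rtScores concepts available_tools ctt).items.map (fun p => p.1)).Nodup := by
    have h : (rtScores concepts available_tools ctt).items.map (fun p => p.1)
        = (rtScores concepts available_tools ctt).keys := rfl
    rw [h, rt_scores_keys]
    exact PySem.Set.nodup_ofList _
  rw [rt_emit_eq_sorted2 _ hndS]
  rw [rt_sorted2_congr _ _ hndS (rt_items_perm concepts available_tools ctt hnd)]

theorem rt_main (concepts : List String) (available_tools : List String) (concept_to_tools : List (String × List String)) (max_tools : Int)
    (hnd : (concept_to_tools.map (fun p => p.1)).Nodup) :
    ¬ D_rank_tools concepts available_tools concept_to_tools max_tools →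
    rank_tools concepts available_tools concept_to_tools max_tools = rank_tools_alt concepts available_tools concept_to_tools max_tools := by
  intro hnd2
  by_cases hc : concepts = []
  · simp [rank_tools, rank_tools_alt, hc]
  rcases lt_trichotomy max_tools 0 with hm | hm | hm
  · -- max_tools < 0: outside D_ the doubly negative slice empties A's list, and B returns []
    rw [rt_B_eval_nonpos concepts available_tools concept_to_tools max_tools hc hm.le]
    rw [rt_A_eval_neg concepts available_tools concept_to_tools max_tools hc hm]
    have hL : ¬ (2 * (-max_tools) < (((concept_to_tools.flatMap (fun p => p.2)).dedup.filter
        (fun t => available_tools.contains t && decide (∃ c ∈ concepts, t ∈ (concept_to_tools.lookup c).getD []))).length : Int)) := by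
      intro h; exact hnd2 ⟨hm, hc, h⟩
    have hlen := rt_len_ranked concepts available_tools concept_to_tools
    set ranked := PySem.List.sorted2 (PySem.Dict.counter (rtFlat concepts available_tools concept_to_tools)).items
        (fun p => -p.2) (fun p => p.1.toList) with hr
    have hz : ((ranked.take (ranked.length - (-max_tools).toNat)).map (fun p => p.1)).length - (-max_tools).toNat = 0 := by
      simp only [List.length_map, List.length_take]
      omega
    rw [hz, List.take_zero]
  · -- max_tools = 0
    subst hm
    rw [rt_B_eval_nonpos concepts available_tools concept_to_tools 0 hc le_rfl]
    simp only [rank_tools, if_neg hc, rt_scores_eq]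
    rw [PySem.List.slice_to _ le_rfl]
    simp only [Int.toNat_zero, List.take_zero]
  · -- max_tools > 0
    rw [rt_B_eval_main concepts available_tools concept_to_tools max_tools hc hnd]
    simp only [rank_tools, if_neg hc, rt_scores_eq]
    set ranked := PySem.List.sorted2 (PySem.Dict.counter (rtFlat concepts available_tools concept_to_tools)).items
        (fun p => -p.2) (fun p => p.1.toList) with hr
    rw [PySem.List.slice_to ranked hm.le]
    set top := (ranked.take max_tools.toNat).map (fun p : String × Int => p.1) with htop
    have htoplen : top.length = min max_tools.toNat ranked.length := by
      simp [htop]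
    have htople : top.length ≤ max_tools.toNat := by omega
    have hgoal : (ranked.map (fun p => p.1)).take max_tools.toNat = top := by
      rw [htop, List.map_take]
    rw [hgoal]
    split_ifs with hent
    · -- the fallback loop runs but adds nothing: every available matched tool is already scored and listed
      have hn : ranked.length < max_tools.toNat := by
        rcases Nat.lt_or_ge ranked.length max_tools.toNat with h | h
        · exact h
        · exfalso
          have : top.length = max_tools.toNat := by omega
          rw [this] at hent
          omega
      have htake : ranked.take max_tools.toNat = ranked := List.take_of_length_le hn.le
      have hmem : ∀ c ∈ concepts, ∀ t ∈ (PySem.Dict.mk concept_to_tools).getD c [],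
          available_tools.contains t = true → PySem.Set.contains (PySem.Set.ofList top) t = true := by
        intro c hcm t ht hav
        have htf : t ∈ rtFlat concepts available_tools concept_to_tools :=
          List.mem_flatMap.2 ⟨c, hcm, List.mem_filter.2 ⟨ht, hav⟩⟩
        have : t ∈ top := by
          rw [htop, htake]
          exact ((rt_names_perm concepts available_tools concept_to_tools).mem_iff).2
            ((PySem.Set.mem_ofList _ t).2 htf)
        rw [rt_set_contains_ofList]
        simpa using this
      rw [rt_fbOuter_noop (PySem.Dict.mk concept_to_tools) available_tools max_tools concepts
        (PySem.Set.ofList top) top hent hmem]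
      rw [PySem.List.slice_to top hm.le]
      exact List.take_of_length_le htople
    · rw [PySem.List.slice_to top hm.le]
      exact List.take_of_length_le htople

-- ===== VERDICT (by name: the statement is the Claim_ definition above) =====
theorem rank_tools_spec : Claim_unchanged_rank_tools := by
  intro c a ct m _ hpre hnd
  exact rt_main c a ct m hpre hnd

theorem rank_tools_changed : Claim_changed_rank_tools := by
  unfold Claim_changed_rank_tools; decide

theorem rank_tools_tight : Claim_exact_rank_tools := by
  unfold Claim_exact_rank_tools
  intro concepts available_tools concept_to_tools max_tools _ _ hD heq
  obtain ⟨hm, hc, hL⟩ := hD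
  rw [rt_B_eval_nonpos concepts available_tools concept_to_tools max_tools hc hm.le] at heq
  rw [rt_A_eval_neg concepts available_tools concept_to_tools max_tools hc hm] at heq
  have hlen := rt_len_ranked concepts available_tools concept_to_tools
  have := congrArg List.length heq
  simp only [List.length_take, List.length_map, List.length_nil] at this
  omega
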